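-- pv_equiv track=rewrite | github.com/Ace1928/eidosian_forge | archive_forge/src/archive_forge/func_split_into_labels.py | split_into_labels
-- ===== SOURCE A (Python) =====
-- def split_into_labels(domain):
--     """
--     Split domain name to a list of labels. Start with the top-most label.
--
--     Returns a list of labels and a tail, which is either ``''`` or ``'.'``.
--     Raises ``InvalidDomainName`` if the domain name is not valid.
--     """
--     result = []
--     index = len(domain)
--     tail = ''
--     if domain.endswith('.'):
--         index -= 1
--         tail = '.'
--     if index > 0:
--         while index >= 0:
--             next_index = domain.rfind('.', 0, index)
--             label = domain[next_index + 1:index]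
--             if label == '' or label[0] == '-' or label[-1] == '-' or (len(label) > 63):
--                 raise InvalidDomainName(domain)
--             result.append(label)
--             index = next_index
--     return (result, tail)
-- ===== SOURCE B (Python) =====
-- def split_into_labels(domain):
--     """
--     Split domain name to a list of labels, top-most label first.
--
--     One forward pass over the characters: labels are accumulated left to
--     right and validated as each one closes; the collected list is reversed
--     on return so the top-most label comes first.
--     """
--     tail = ''
--     body = domain
--     if domain.endswith('.'):
--         body = domain[:-1]
--         tail = '.'
--     if body == '':
--         return ([], tail)
--     labels = []
--     cur = []
--     for ch in body:
--         if ch == '.':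
--             labels.append(_close_label(domain, cur))
--             cur = []
--         else:
--             cur.append(ch)
--     labels.append(_close_label(domain, cur))
--     return (labels[::-1], tail)
--
--
-- def _close_label(domain, cur):
--     label = ''.join(cur)
--     if label == '' or label[0] == '-' or label[-1] == '-' or len(label) > 63:
--         raise InvalidDomainName(domain)
--     return label
-- ===== Notes on version B (the rewrite author's own statement) =====
-- stated objective: idiomatic
-- what changed: A peels labels off the back with repeated rfind and slicing; B strips the tail once and makes a single forward character pass that accumulates and validates each label as it closes, reversing the collected list on return.
import Mathlib
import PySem

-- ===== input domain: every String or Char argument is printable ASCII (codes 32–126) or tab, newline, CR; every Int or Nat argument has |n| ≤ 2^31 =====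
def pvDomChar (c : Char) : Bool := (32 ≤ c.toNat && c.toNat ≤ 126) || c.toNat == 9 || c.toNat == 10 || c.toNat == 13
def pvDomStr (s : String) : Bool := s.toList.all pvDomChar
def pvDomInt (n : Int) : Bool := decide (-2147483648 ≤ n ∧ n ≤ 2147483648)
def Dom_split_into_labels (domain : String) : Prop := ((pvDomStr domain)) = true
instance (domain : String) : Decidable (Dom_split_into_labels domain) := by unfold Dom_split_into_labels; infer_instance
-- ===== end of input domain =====

-- B replaces A's backwards rfind-and-slice loop by one forward pass that closes and
-- validates labels as it meets each dot (idiomatic decomposition; same asymptotic cost).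


-- ===== PORT A =====
-- the validity test shared by both ports (and Pre_):
-- label == '' or label[0] == '-' or label[-1] == '-' or len(label) > 63
def pvBadLabel (l : List Char) : Bool :=
  l.isEmpty || (PySem.List.pyGet? l 0 == some '-') || (PySem.List.pyGet? l (-1) == some '-')
    || decide (63 < l.length)

-- the while-loop of A; fuel bounds the iterations (index strictly decreases each turn);
-- `none` marks the `raise InvalidDomainName` exit
def pvLoopA (cs : List Char) : Nat → Int → List (List Char) → Option (List (List Char))
  | 0, _, _ => none
  | fuel + 1, index, acc =>
    if 0 ≤ index then
      -- next_index = domain.rfind('.', 0, index); label = domain[next_index+1:index]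
      if pvBadLabel (PySem.List.slice cs
          (some (PySem.Chars.rfindFrom cs ['.'] 0 (some index) + 1)) (some index)) then none
      else
        pvLoopA cs fuel (PySem.Chars.rfindFrom cs ['.'] 0 (some index))
          (acc ++ [PySem.List.slice cs
            (some (PySem.Chars.rfindFrom cs ['.'] 0 (some index) + 1)) (some index)])
    else some acc

def split_into_labels (domain : String) : List String × String :=
  let cs := domain.toList
  let n : Int := cs.length
  let (index, tail) := if PySem.Chars.endswith cs ['.'] then (n - 1, ".") else (n, "")
  if 0 < index then
    match pvLoopA cs (cs.length + 2) index [] with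
    | some r => (r.map (fun l => String.ofList l), tail)
    | none => ([], tail)        -- raise InvalidDomainName (outside Pre_)
  else ([], tail)

-- ===== PORT B =====
-- forward scan of B: `cur` holds the characters of the open label in reverse,
-- `labs` the labels already closed (in left-to-right order); `none` = raise
def pvScanB (cs : List Char) (cur : List Char) (labs : List (List Char)) :
    Option (List (List Char)) :=
  match cs with
  | [] => if pvBadLabel cur.reverse then none else some (labs ++ [cur.reverse])
  | c :: rest =>
    if c = '.' then
      if pvBadLabel cur.reverse then none else pvScanB rest [] (labs ++ [cur.reverse])
    else pvScanB rest (c :: cur) labs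

def split_into_labels_alt (domain : String) : List String × String :=
  let cs := domain.toList
  let (body, tail) := if PySem.Chars.endswith cs ['.'] then (cs.dropLast, ".") else (cs, "")
  if body.isEmpty then ([], tail)
  else
    match pvScanB body [] [] with
    | some labs => (labs.reverse.map (fun l => String.ofList l), tail)
    | none => ([], tail)        -- raise InvalidDomainName (outside Pre_)

-- ===== PRECONDITION & SPEC =====
-- Pre_ excludes exactly the inputs on which Python A raises InvalidDomainName:
-- some label of the domain (tail dot stripped) is empty, begins or ends with a hyphen, or is longer than 63 characters.
def Pre_split_into_labels (domain : String) : Prop :=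
  domain.toList = [] ∨
    (let body := if PySem.Chars.endswith domain.toList ['.'] then domain.toList.dropLast
                 else domain.toList
     body = [] ∨ (PySem.Chars.splitOn body ['.']).all (fun l => !pvBadLabel l) = true)
instance (domain : String) : Decidable (Pre_split_into_labels domain) := by
  unfold Pre_split_into_labels; infer_instance
def pvWitness_split_into_labels : String := "www.example-site.org."
def Spec_split_into_labels (domain : String) (out : List String × String) : Prop :=
  out = split_into_labels_alt domain
instance (domain : String) (out : List String × String) :
    Decidable (Spec_split_into_labels domain out) := by unfold Spec_split_into_labels; infer_instance

-- ===== CLAIM (what is proved, stated in full; the proofs are below) =====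
def Claim_equal_split_into_labels : Prop := ∀ (domain : String), Dom_split_into_labels domain → Pre_split_into_labels domain → Spec_split_into_labels domain (split_into_labels domain)

-- ===== LEMMAS AND PROOFS =====
theorem pv_isPrefixOf_dot (l : List Char) : (['.'].isPrefixOf l) = (l.head? == some '.') := by
  cases l with
  | nil => simp [List.isPrefixOf]
  | cons c t => simp [List.isPrefixOf, eq_comm]

theorem pv_go_no_dot (s : List Char) (k : Nat)
    (h : ∀ p, p ≤ k → s[p]? ≠ some '.') :
    PySem.Chars.rfind.go s ['.'] k = -1 := by
  induction k with
  | zero => simp [PySem.Chars.rfind.go, pv_isPrefixOf_dot, List.head?_eq_getElem?, h 0 (le_refl _)]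
  | succ k ih =>
    simp [PySem.Chars.rfind.go, pv_isPrefixOf_dot, List.head?_eq_getElem?, h (k+1) (le_refl _)]
    exact ih (fun p hp => h p (Nat.le_succ_of_le hp))

theorem pv_go_last_dot (s : List Char) (k j : Nat)
    (hjk : j ≤ k) (hj : s[j]? = some '.')
    (h : ∀ p, j < p → p ≤ k → s[p]? ≠ some '.') :
    PySem.Chars.rfind.go s ['.'] k = (j : Int) := by
  induction k with
  | zero =>
    have hj0 : j = 0 := Nat.le_zero.mp hjk
    subst hj0
    simp [PySem.Chars.rfind.go, pv_isPrefixOf_dot, List.head?_eq_getElem?, hj]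
  | succ k ih =>
    by_cases hje : j = k + 1
    · subst hje
      simp [PySem.Chars.rfind.go, pv_isPrefixOf_dot, List.head?_eq_getElem?, hj]
    · have hjk' : j ≤ k := Nat.lt_succ_iff.mp (lt_of_le_of_ne hjk hje)
      have hne : s[k+1]? ≠ some '.' := h (k+1) (Nat.lt_succ_of_le hjk') (le_refl _)
      simp [PySem.Chars.rfind.go, pv_isPrefixOf_dot, List.head?_eq_getElem?, hne]
      exact ih hjk' (fun p hp hp' => h p hp (Nat.le_succ_of_le hp'))

theorem pv_rfind_no_dot (s : List Char) (h : '.' ∉ s) :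
    PySem.Chars.rfind s ['.'] = -1 := by
  unfold PySem.Chars.rfind
  apply pv_go_no_dot
  intro p _ hp
  exact h (List.mem_of_getElem? hp)

theorem pv_rfind_last_dot (u v : List Char) (hv : '.' ∉ v) :
    PySem.Chars.rfind (u ++ '.' :: v) ['.'] = (u.length : Int) := by
  unfold PySem.Chars.rfind
  apply pv_go_last_dot
  · simp
  · rw [List.getElem?_append_right (le_refl _)]
    simp
  · intro p hp _ hcon
    by_cases hplen : p < (u ++ '.' :: v).length
    · rw [List.getElem?_append_right (by omega)] at hcon
      have h2 : p - u.length ≠ 0 := by omega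
      obtain ⟨q, hq⟩ := Nat.exists_eq_succ_of_ne_zero h2
      rw [hq] at hcon
      simp at hcon
      exact hv (List.mem_of_getElem? hcon)
    · rw [List.getElem?_eq_none (by omega)] at hcon
      simp at hcon

theorem pv_rfindFrom_take (cs : List Char) (i : Nat) (hi : i ≤ cs.length) :
    PySem.Chars.rfindFrom cs ['.'] 0 (some (i : Int)) =
      PySem.Chars.rfind (cs.take i) ['.'] := by
  unfold PySem.Chars.rfindFrom
  simp only []
  rw [if_neg (show ¬((cs.length:Int) < (i:Int)) by exact_mod_cast Nat.not_lt.mpr hi)]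
  norm_num
  simp only [if_neg (show ¬((i:Int) < 0) by omega), Int.toNat_natCast]
  split_ifs with h <;> omega

theorem pv_last_split {c : Char} (l : List Char) (h : c ∈ l) :
    ∃ u v, l = u ++ c :: v ∧ c ∉ v := by
  induction l with
  | nil => cases h
  | cons a t ih =>
    by_cases ht : c ∈ t
    · obtain ⟨u, v, rfl, hv⟩ := ih ht
      exact ⟨a :: u, v, rfl, hv⟩
    · rcases List.mem_cons.mp h with rfl | hmem
      · exact ⟨[], t, rfl, ht⟩
      · exact absurd hmem ht

theorem pv_scanB_no_dot (v : List Char) (hv : '.' ∉ v) :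
    ∀ cur labs, pvScanB v cur labs =
      if pvBadLabel (cur.reverse ++ v) then none else some (labs ++ [cur.reverse ++ v]) := by
  induction v with
  | nil => intro cur labs; simp [pvScanB]
  | cons c rest ih =>
    intro cur labs
    have hc : c ≠ '.' := fun hh => hv (hh ▸ List.mem_cons_self)
    have hrest : '.' ∉ rest := fun hh => hv (List.mem_cons_of_mem _ hh)
    simp only [pvScanB, if_neg hc]
    rw [ih hrest (c :: cur) labs]
    simp

theorem pv_scanB_append (v : List Char) (hv : '.' ∉ v) :
    ∀ u cur labs, pvScanB (u ++ '.' :: v) cur labs =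
      (pvScanB u cur labs).bind
        (fun L => if pvBadLabel v then none else some (L ++ [v])) := by
  intro u
  induction u with
  | nil =>
    intro cur labs
    simp only [List.nil_append, pvScanB]
    by_cases hb : pvBadLabel cur.reverse
    · simp [hb]
    · simp only [hb, if_false, Bool.false_eq_true]
      rw [pv_scanB_no_dot v hv [] (labs ++ [cur.reverse])]
      simp
  | cons a rest ih =>
    intro cur labs
    by_cases ha : a = '.'
    · subst ha
      simp only [List.cons_append, pvScanB]
      by_cases hb : pvBadLabel cur.reverse
      · simp [hb]
      · simp only [hb, if_false, Bool.false_eq_true]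
        exact ih [] (labs ++ [cur.reverse])
    · simp only [List.cons_append, pvScanB, if_neg ha]
      exact ih (a :: cur) labs

theorem pv_bad_nil : pvBadLabel [] = true := by decide

theorem pv_loopA_zero (cs : List Char) (f : Nat) (acc : List (List Char)) :
    pvLoopA cs (f + 1) (((0 : Nat) : Int)) acc = none := by
  rw [pvLoopA]
  rw [if_pos (by positivity)]
  rw [pv_rfindFrom_take cs 0 (by omega)]
  rw [List.take_zero, pv_rfind_no_dot [] (by simp)]
  rw [show ((-1:Int) + 1) = (((0:Nat)):Int) by norm_num]
  rw [PySem.List.slice_natCast]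
  simp [pv_bad_nil]

theorem pv_master (i : Nat) :
    ∀ (cs : List Char) (fuel : Nat) (acc : List (List Char)),
      1 ≤ i → i ≤ cs.length → i + 2 ≤ fuel →
      pvLoopA cs fuel (i : Int) acc =
        (pvScanB (cs.take i) [] []).map (fun L => acc ++ L.reverse) := by
  induction i using Nat.strong_induction_on with
  | _ i IH =>
    intro cs fuel acc h1 hilen hfuel
    obtain ⟨f, rfl⟩ : ∃ f, fuel = f + 1 := ⟨fuel - 1, by omega⟩
    obtain ⟨f', rfl⟩ : ∃ f', f = f' + 1 := ⟨f - 1, by omega⟩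
    rw [pvLoopA]
    rw [if_pos (by positivity)]
    rw [pv_rfindFrom_take cs i hilen]
    by_cases hdot : '.' ∈ cs.take i
    · obtain ⟨u, v, huv, hv⟩ := pv_last_split (cs.take i) hdot
      have hlen : (cs.take i).length = i := List.length_take_of_le hilen
      have hulen : u.length + 1 + v.length = i := by
        rw [huv] at hlen; simp at hlen; omega
      rw [huv, pv_rfind_last_dot u v hv]
      have hlabel : PySem.List.slice cs (some ((u.length : Int) + 1)) (some (i : Int)) = v := by
        have h1' : ((u.length : Int) + 1) = ((u.length + 1 : Nat) : Int) := by push_cast; ring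
        rw [h1', PySem.List.slice_natCast]
        have : List.drop (u.length + 1) (cs.take i) = v := by
          rw [huv]
          rw [show u.length + 1 = (u ++ ['.']).length by simp]
          rw [show u ++ '.' :: v = (u ++ ['.']) ++ v by simp]
          exact List.drop_left' rfl
        rw [List.drop_take] at this
        rw [← this]
      rw [hlabel]
      rw [pv_scanB_append v hv u [] []]
      by_cases hbv : pvBadLabel v
      · rw [if_pos hbv]
        simp only [hbv, if_true]
        cases pvScanB u [] [] <;> simp
      · rw [if_neg hbv]
        simp only [hbv, if_false, Bool.false_eq_true]
        by_cases hu0 : u.length = 0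
        · -- u = [], first label closes empty: next loop step raises; scanB u gives none
          have hu : u = [] := List.length_eq_zero_iff.mp hu0
          subst hu
          simp only [List.length_nil]
          rw [pv_loopA_zero]
          simp [pvScanB, pv_bad_nil]
        · have hj1 : 1 ≤ u.length := by omega
          have hji : u.length < i := by omega
          rw [IH u.length hji cs (f' + 1) (acc ++ [v]) hj1 (by omega) (by omega)]
          have htu : cs.take u.length = u := by
            have : (cs.take i).take u.length = u := by
              rw [huv]; exact List.take_left' rfl
            rwa [List.take_take, min_eq_left (by omega)] at this
          rw [htu]
          cases pvScanB u [] [] <;> simp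
    · rw [pv_rfind_no_dot _ hdot]
      have hlabel : PySem.List.slice cs (some ((-1:Int) + 1)) (some (i : Int)) = cs.take i := by
        rw [show ((-1:Int)+1) = ((0:Nat):Int) by ring, PySem.List.slice_natCast]
        simp
      rw [hlabel]
      rw [pv_scanB_no_dot (cs.take i) hdot [] []]
      by_cases hb : pvBadLabel (cs.take i)
      · simp [hb]
      · simp only [hb, if_false, Bool.false_eq_true]
        rw [pvLoopA]
        rw [if_neg (by omega)]
        simp [hb]

theorem pv_endswith_dot (cs : List Char) (h : PySem.Chars.endswith cs ['.'] = true) :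
    ∃ body, cs = body ++ ['.'] := by
  unfold PySem.Chars.endswith at h
  obtain ⟨t, ht⟩ := List.isSuffixOf_iff_suffix.mp h
  exact ⟨t, ht.symm⟩

-- ===== VERDICT (by name: the statement is the Claim_ definition above) =====
theorem split_into_labels_spec : Claim_equal_split_into_labels := by
  intro domain _ _
  unfold Spec_split_into_labels split_into_labels split_into_labels_alt
  by_cases hend : PySem.Chars.endswith domain.toList ['.'] = true
  · obtain ⟨body, hbody⟩ := pv_endswith_dot _ hend
    rw [hbody] at hend
    rw [hbody]
    simp only [hend, if_true]
    rw [show (body ++ ['.']).dropLast = body by simp]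
    by_cases hb0 : body = []
    · subst hb0
      decide
    · have hlen1 : 1 ≤ body.length := by
        have := List.length_pos_iff.mpr hb0; omega
      have hcast : (((body ++ ['.']).length : Int) - 1) = ((body.length : Nat) : Int) := by
        simp
      rw [hcast]
      rw [if_pos (by exact_mod_cast hlen1)]
      rw [pv_master body.length (body ++ ['.']) ((body ++ ['.']).length + 2) [] hlen1
        (by simp) (by simp)]
      rw [List.take_left' rfl]
      rw [if_neg (by simp [hb0])]
      cases pvScanB body [] [] <;> simp
  · simp only [hend, if_false, Bool.false_eq_true]
    by_cases hnil : domain.toList = []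
    · simp [hnil]
    · have hlen : 1 ≤ domain.toList.length := by
        have := List.length_pos_iff.mpr hnil; omega
      rw [if_pos (by exact_mod_cast hlen)]
      rw [pv_master domain.toList.length domain.toList (domain.toList.length + 2) [] hlen
        le_rfl (by omega)]
      rw [List.take_length]
      rw [if_neg (by simp [hnil])]
      cases pvScanB domain.toList [] [] <;> simp
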